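-- pv_equiv track=rewrite | github.com/lgarrison/adventofcode2025 | src/aoc/day12/__main__.py | valid_board
-- ===== SOURCE A (Python) =====
-- def valid_board(dim, pieces):
--     board = set()
--     for piece in pieces:
--         if board & piece:
--             return False
--         if not all(0 <= r < dim[0] and 0 <= c < dim[1] for r, c in piece):
--             return False
--         board |= piece
--     return True
-- ===== SOURCE B (Python) =====
-- def valid_board(dim, pieces):
--     board = set()
--     total = 0
--     for piece in pieces:
--         board |= piece
--         total += len(piece)
--     if len(board) != total:
--         return False
--     return all(0 <= r < dim[0] and 0 <= c < dim[1] for r, c in board)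
-- ===== Notes on version B (the rewrite author's own statement) =====
-- stated objective: alternative
-- what changed: Replaces the per-piece interleaved intersection-and-bounds checks with three aggregate phases: one pass builds the full union plus a running cell count, overlap is then detected as len(union) != count, and bounds are checked once over the combined set.
import Mathlib
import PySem

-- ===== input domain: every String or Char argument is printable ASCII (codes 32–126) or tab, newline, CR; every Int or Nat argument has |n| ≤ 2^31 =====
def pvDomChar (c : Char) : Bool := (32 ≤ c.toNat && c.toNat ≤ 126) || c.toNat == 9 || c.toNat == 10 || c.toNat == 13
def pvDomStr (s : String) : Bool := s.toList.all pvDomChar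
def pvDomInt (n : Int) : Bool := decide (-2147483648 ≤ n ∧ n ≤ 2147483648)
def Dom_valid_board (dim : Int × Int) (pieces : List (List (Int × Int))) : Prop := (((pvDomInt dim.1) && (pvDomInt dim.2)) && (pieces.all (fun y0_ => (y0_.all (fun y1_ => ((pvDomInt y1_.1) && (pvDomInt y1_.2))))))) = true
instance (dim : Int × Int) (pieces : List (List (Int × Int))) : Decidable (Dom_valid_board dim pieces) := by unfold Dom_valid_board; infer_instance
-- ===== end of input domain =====

-- B replaces A's per-piece interleaved overlap-and-bounds checks by aggregate phases:
-- build the union and a cell count in one pass, detect overlap by len(union) != count,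
-- then bounds-check the combined set once. Alternative decomposition, same cost.

-- ===== PORT A =====
-- helper for A: '0 <= r < dim[0] and 0 <= c < dim[1]'
def aInBounds (dim : Int × Int) (cell : Int × Int) : Bool :=
  decide (0 ≤ cell.1) && decide (cell.1 < dim.1) && decide (0 ≤ cell.2) && decide (cell.2 < dim.2)

-- the 'for piece in pieces' loop of A, with the accumulated set 'board'
def aLoop (dim : Int × Int) (board : PySem.Set (Int × Int)) :
    List (List (Int × Int)) → Bool
  | [] => true
  | piece :: rest =>
    if PySem.Set.inter board piece ≠ [] then false
    else if ¬ (piece.all (aInBounds dim) = true) then false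
    else aLoop dim (PySem.Set.update board piece) rest

def valid_board (dim : Int × Int) (pieces : List (List (Int × Int))) : Bool :=
  aLoop dim PySem.Set.empty pieces

-- ===== PORT B =====
-- helper for B: the bounds test over a combined cell
def bInBounds (dim : Int × Int) (cell : Int × Int) : Bool :=
  decide (0 ≤ cell.1 ∧ cell.1 < dim.1 ∧ 0 ≤ cell.2 ∧ cell.2 < dim.2)

-- one step of B's single accumulation pass: union in the piece, count its cells
def bStep (st : PySem.Set (Int × Int) × Int) (piece : List (Int × Int)) :
    PySem.Set (Int × Int) × Int :=
  (PySem.Set.update st.1 piece, st.2 + (piece.length : Int))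

def valid_board_alt (dim : Int × Int) (pieces : List (List (Int × Int))) : Bool :=
  let st := pieces.foldl bStep (PySem.Set.empty, 0)
  if (st.1.length : Int) ≠ st.2 then false
  else st.1.all (bInBounds dim)

-- ===== PRECONDITION & SPEC =====
-- Each inner list stands for a Python set (declared type list[set[tuple[int,int]]]), so it
-- must hold distinct cells; Pre_ excludes inner lists with duplicates, which represent no
-- Python input (run as plain lists they make A raise TypeError on 'board & piece').
def Pre_valid_board (dim : Int × Int) (pieces : List (List (Int × Int))) : Prop :=
  ∀ piece ∈ pieces, piece.Nodup
instance (dim : Int × Int) (pieces : List (List (Int × Int))) : Decidable (Pre_valid_board dim pieces) := by unfold Pre_valid_board; infer_instance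

def pvWitness_valid_board : (Int × Int) × (List (List (Int × Int))) :=
  ((2, 2), [[(0, 0), (0, 1)], [(1, 0)]])

def Spec_valid_board (dim : Int × Int) (pieces : List (List (Int × Int))) (out : Bool) : Prop := out = valid_board_alt dim pieces
instance (dim : Int × Int) (pieces : List (List (Int × Int))) (out : Bool) : Decidable (Spec_valid_board dim pieces out) := by unfold Spec_valid_board; infer_instance

-- ===== CLAIM (what is proved, stated in full; the proofs are below) =====
def Claim_equal_valid_board : Prop := ∀ (dim : Int × Int) (pieces : List (List (Int × Int))), Dom_valid_board dim pieces → Pre_valid_board dim pieces → Spec_valid_board dim pieces (valid_board dim pieces)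

-- ===== LEMMAS AND PROOFS =====

-- the two bounds tests agree
lemma inBounds_eq (dim cell : Int × Int) : bInBounds dim cell = aInBounds dim cell := by
  simp [aInBounds, bInBounds, Bool.and_assoc]

-- B's fold splits into the union fold and the running total
def uFold (board : PySem.Set (Int × Int)) (pieces : List (List (Int × Int))) :
    PySem.Set (Int × Int) :=
  pieces.foldl (fun s p => PySem.Set.update s p) board

lemma bFold_decomp (pieces : List (List (Int × Int)))
    (board : PySem.Set (Int × Int)) (t : Int) :
    pieces.foldl bStep (board, t) =
      (uFold board pieces, t + ((pieces.map (fun p => (p.length : Int))).sum)) := by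
  induction pieces generalizing board t with
  | nil => simp [uFold]
  | cons p rest ih =>
      simp only [uFold, List.foldl_cons, List.map_cons, List.sum_cons, bStep, ih]
      exact Prod.ext rfl (by ring)

lemma mem_uFold (x : Int × Int) (pieces : List (List (Int × Int)))
    (board : PySem.Set (Int × Int)) :
    x ∈ uFold board pieces ↔ x ∈ board ∨ ∃ p ∈ pieces, x ∈ p := by
  induction pieces generalizing board with
  | nil => simp [uFold]
  | cons p rest ih =>
      simp only [uFold, List.foldl_cons] at *
      rw [ih, PySem.Set.mem_update]
      simp only [List.mem_cons]
      constructor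
      · rintro ((h | h) | ⟨q, hq, hx⟩)
        · exact Or.inl h
        · exact Or.inr ⟨p, Or.inl rfl, h⟩
        · exact Or.inr ⟨q, Or.inr hq, hx⟩
      · rintro (h | ⟨q, (rfl | hq), hx⟩)
        · exact Or.inl (Or.inl h)
        · exact Or.inl (Or.inr hx)
        · exact Or.inr ⟨q, hq, hx⟩

lemma len_update_le (board : PySem.Set (Int × Int)) (p : List (Int × Int)) :
    (PySem.Set.update board p).length ≤ board.length + p.length := by
  rw [PySem.Set.update_eq_append_filter, List.length_append]
  have h1 : (List.filter (fun y => !PySem.Set.contains board y) (PySem.Set.ofList p)).length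
      ≤ (PySem.Set.ofList p).length := List.length_filter_le _ _
  have h2 := PySem.Set.length_ofList_le p
  omega

lemma len_uFold_le (pieces : List (List (Int × Int))) (board : PySem.Set (Int × Int)) :
    ((uFold board pieces).length : Int) ≤ (board.length : Int) + (pieces.map (fun p => (p.length : Int))).sum := by
  induction pieces generalizing board with
  | nil => simp [uFold]
  | cons p rest ih =>
      simp only [uFold, List.foldl_cons, List.map_cons, List.sum_cons]
      have h1 := ih (PySem.Set.update board p)
      simp only [uFold] at h1
      have h2 := len_update_le board p
      have h2' : ((PySem.Set.update board p).length : Int) ≤ (board.length : Int) + (p.length : Int) := by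
        exact_mod_cast h2
      omega

-- overlap makes the union strictly shorter than the count
lemma len_update_lt (board : PySem.Set (Int × Int)) (p : List (Int × Int))
    (hnd : p.Nodup) (x : Int × Int) (hxp : x ∈ p) (hxb : x ∈ board) :
    (PySem.Set.update board p).length < board.length + p.length := by
  rw [PySem.Set.update_eq_append_filter, PySem.Set.ofList_eq_self_of_nodup p hnd,
    List.length_append]
  have : (p.filter (fun y => !PySem.Set.contains board y)).length < p.length := by
    apply List.length_filter_lt_length_iff_exists.mpr
    exact ⟨x, hxp, by simp [hxb]⟩
  omega

-- the main loop invariant: A's loop equals B's aggregate check, for any in-bounds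
-- duplicate-free accumulated board
lemma loop_eq (dim : Int × Int) (pieces : List (List (Int × Int)))
    (board : PySem.Set (Int × Int)) (hbn : board.Nodup)
    (hbb : board.all (aInBounds dim) = true)
    (hpre : ∀ piece ∈ pieces, piece.Nodup) :
    aLoop dim board pieces =
      (if ((uFold board pieces).length : Int) ≠ (board.length : Int) + (pieces.map (fun p => (p.length : Int))).sum then false
       else (uFold board pieces).all (bInBounds dim)) := by
  induction pieces generalizing board with
  | nil =>
      rw [aLoop]
      simp only [uFold, List.foldl_nil, List.map_nil, List.sum_nil, add_zero]
      rw [if_neg (by simp)]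
      symm
      simp only [List.all_eq_true]
      intro x hx
      rw [inBounds_eq]
      exact List.all_eq_true.mp hbb x hx
  | cons piece rest ih =>
      have hpn : piece.Nodup := hpre piece (by simp)
      have hrest : ∀ q ∈ rest, q.Nodup := fun q hq => hpre q (by simp [hq])
      by_cases hov : PySem.Set.inter board piece ≠ []
      · -- overlap: A returns false; B's size test fails
        obtain ⟨x, hx⟩ := List.exists_mem_of_ne_nil _ hov
        have hx' := (PySem.Set.mem_inter board piece x).mp hx
        rw [aLoop, if_pos hov]
        have hlt := len_update_lt board piece hpn x hx'.2 hx'.1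
        have hle := len_uFold_le rest (PySem.Set.update board piece)
        simp only [uFold, List.foldl_cons, List.map_cons, List.sum_cons] at *
        rw [if_pos (by omega)]
      · -- no overlap with the accumulated board
        have hdisj : ∀ x ∈ piece, x ∉ board := by
          intro x hxp hxb
          exact hov (fun hnil => by
            have hm : x ∈ PySem.Set.inter board piece :=
              (PySem.Set.mem_inter board piece x).mpr ⟨hxb, hxp⟩
            rw [hnil] at hm
            exact (List.not_mem_nil).elim hm)
        have hupd : PySem.Set.update board piece = board ++ piece :=
          PySem.Set.update_eq_append_of_disjoint board piece hpn hdisj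
        by_cases hb : piece.all (aInBounds dim) = true
        · -- piece passes: A recurses; B's fold advanced one step
          rw [aLoop, if_neg hov, if_neg (by simp [hb])]
          have hbn' : (PySem.Set.update board piece).Nodup := by
            rw [hupd]
            exact List.Nodup.append hbn hpn (fun x hx1 hx2 => hdisj x hx2 hx1)
          have hbb' : (PySem.Set.update board piece).all (aInBounds dim) = true := by
            rw [hupd, List.all_append, hbb, hb]; rfl
          rw [ih (PySem.Set.update board piece) hbn' hbb' hrest]
          simp only [uFold, List.foldl_cons, List.map_cons, List.sum_cons]
          have hlen : ((PySem.Set.update board piece).length : Int) = (board.length : Int) + (piece.length : Int) := by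
            rw [hupd]; push_cast [List.length_append]; ring
          rw [hlen]
          ring_nf
        · -- piece out of bounds: A returns false; B finds the bad cell in the union
          rw [aLoop, if_neg hov, if_pos (by simp [hb])]
          obtain ⟨x, hxp, hxbad⟩ : ∃ x ∈ piece, ¬ aInBounds dim x = true := by
            simpa using hb
          by_cases hsz : ((uFold board (piece :: rest)).length : Int) ≠ (board.length : Int) + ((piece :: rest).map (fun p => (p.length : Int))).sum
          · rw [if_pos hsz]
          · rw [if_neg hsz]
            have hxmem : x ∈ uFold board (piece :: rest) :=
              (mem_uFold x (piece :: rest) board).mpr (Or.inr ⟨piece, by simp, hxp⟩)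
            symm
            rw [List.all_eq_false]
            exact ⟨x, hxmem, by rw [inBounds_eq]; exact hxbad⟩

-- ===== VERDICT (by name: the statement is the Claim_ definition above) =====
theorem valid_board_spec : Claim_equal_valid_board := by
  intro dim pieces _ hpre
  unfold Spec_valid_board valid_board valid_board_alt
  rw [loop_eq dim pieces PySem.Set.empty (by simp [PySem.Set.empty]) (by simp [PySem.Set.empty]) hpre]
  rw [bFold_decomp]
  simp [uFold, PySem.Set.empty]
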